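-- pv_equiv track=rewrite | github.com/samuel-constantino/sd-012-inventory-report | inventory_report/reports/helpers/company_inventory.py | get_company_inventory
-- ===== SOURCE A (Python) =====
-- def get_company_inventory(stock):
--     company_inventory = {}
--
--     for product in stock:
--         if product['nome_da_empresa'] not in company_inventory:
--             company_inventory[product['nome_da_empresa']] = 1
--         else:
--             company_inventory[product['nome_da_empresa']] += 1
--
--     return company_inventory
-- ===== SOURCE B (Python) =====
-- def get_company_inventory(stock):
--     # Two-pass: extract the column of company names once, then build the
--     # result from the ordered-distinct names, counting each in the column.
--     names = [product['nome_da_empresa'] for product in stock]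
--     return {name: names.count(name) for name in dict.fromkeys(names)}
-- ===== Notes on version B (the rewrite author's own statement) =====
-- stated objective: alternative
-- what changed: Replaces the incremental membership-test/update tally loop over a dict with a two-pass column extraction: build the list of company names once, then map each first-occurrence-ordered distinct name to its count in that list.
import Mathlib
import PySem

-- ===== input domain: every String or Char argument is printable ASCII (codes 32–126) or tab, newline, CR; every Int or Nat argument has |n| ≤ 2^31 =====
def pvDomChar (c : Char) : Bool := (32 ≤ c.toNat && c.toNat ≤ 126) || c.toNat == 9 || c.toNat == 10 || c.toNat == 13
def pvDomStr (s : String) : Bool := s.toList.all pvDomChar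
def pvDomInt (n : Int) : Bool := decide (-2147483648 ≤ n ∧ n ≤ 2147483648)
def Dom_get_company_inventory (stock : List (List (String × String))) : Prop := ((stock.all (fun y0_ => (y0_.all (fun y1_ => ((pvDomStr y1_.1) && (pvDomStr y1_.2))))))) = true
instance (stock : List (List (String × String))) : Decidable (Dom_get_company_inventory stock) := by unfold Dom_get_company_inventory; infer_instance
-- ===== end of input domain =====

-- B changes the decomposition (two-pass column extraction + per-distinct-name count instead of an
-- incremental dict tally); equivalence of the RETURN value is proved on inputs where every product
-- has the key 'nome_da_empresa' (Pre_), since A raises KeyError otherwise.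

-- ===== PORT A =====
def get_company_inventory (stock : List (List (String × String))) : List (String × Int) :=
  (stock.foldl (fun ci product =>
      match (PySem.Dict.mk product).get? "nome_da_empresa" with
      | none => ci     -- Python raises KeyError here; excluded by Pre_
      | some name =>
        if ci.contains name = false then ci.insert name 1
        else ci.modify name 0 (· + 1))
    (PySem.Dict.empty)).items

-- ===== PORT B =====
def get_company_inventory_alt (stock : List (List (String × String))) : List (String × Int) :=
  -- names = [product['nome_da_empresa'] for product in stock]  (key present under Pre_, so filterMap = map)
  let names := stock.filterMap (fun product => (PySem.Dict.mk product).get? "nome_da_empresa")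
  (PySem.List.dedup names).map (fun name => (name, (names.count name : Int)))

-- ===== PRECONDITION & SPEC =====
-- Pre_ excludes exactly the inputs where some product lacks the key 'nome_da_empresa', on which A raises KeyError.
def Pre_get_company_inventory (stock : List (List (String × String))) : Prop :=
  ∀ product ∈ stock, "nome_da_empresa" ∈ product.map (·.1)
instance (stock : List (List (String × String))) : Decidable (Pre_get_company_inventory stock) := by unfold Pre_get_company_inventory; infer_instance

def pvWitness_get_company_inventory : (List (List (String × String))) :=
  [[("nome_da_empresa", "Acme"), ("id", "1")], [("nome_da_empresa", "Bolt")], [("nome_da_empresa", "Acme")]]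

def Spec_get_company_inventory (stock : List (List (String × String))) (out : List (String × Int)) : Prop := out = get_company_inventory_alt stock
instance (stock : List (List (String × String))) (out : List (String × Int)) : Decidable (Spec_get_company_inventory stock out) := by unfold Spec_get_company_inventory; infer_instance

-- ===== CLAIM (what is proved, stated in full; the proofs are below) =====
def Claim_equal_get_company_inventory : Prop := ∀ (stock : List (List (String × String))), Dom_get_company_inventory stock → Pre_get_company_inventory stock → Spec_get_company_inventory stock (get_company_inventory stock)

-- ===== LEMMAS AND PROOFS =====

-- A's branch ('new key: set to 1, else += 1') is exactly the Counter step.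
lemma step_eq_modify {d : PySem.Dict String Int} {name : String} :
    (if d.contains name = false then d.insert name 1 else d.modify name 0 (· + 1))
      = d.modify name 0 (· + 1) := by
  by_cases h : d.contains name = false
  · rw [show d.modify name 0 (· + 1) = d.insert name (d.getD name 0 + 1) from rfl,
        PySem.Dict.getD_of_not_contains d 0 h]
    simp [h]
  · simp [h]

-- A's loop over stock equals the Counter fold over the extracted name column.
lemma foldA_eq_counter (stock : List (List (String × String))) (d : PySem.Dict String Int)
    (h : Pre_get_company_inventory stock) :
    stock.foldl (fun ci product =>
        match (PySem.Dict.mk product).get? "nome_da_empresa" with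
        | none => ci
        | some name =>
          if ci.contains name = false then ci.insert name 1
          else ci.modify name 0 (· + 1)) d
      = (stock.filterMap (fun product => (PySem.Dict.mk product).get? "nome_da_empresa")).foldl
          (fun ci name => ci.modify name 0 (· + 1)) d := by
  induction stock generalizing d with
  | nil => rfl
  | cons p rest ih =>
    have hp := h p (by simp)
    have : ((PySem.Dict.mk p).get? "nome_da_empresa").isSome := by
      rw [← PySem.Dict.contains_eq_isSome_get?, PySem.Dict.contains_eq_decide_mem_keys]
      simpa using hp
    obtain ⟨name, hn⟩ := Option.isSome_iff_exists.mp this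
    simp only [List.foldl_cons, List.filterMap_cons, hn]
    rw [step_eq_modify]
    exact ih _ (fun q hq => h q (by simp [hq]))

-- ===== VERDICT (by name: the statement is the Claim_ definition above) =====
theorem get_company_inventory_spec : Claim_equal_get_company_inventory := by
  intro stock _ hpre
  unfold Spec_get_company_inventory get_company_inventory get_company_inventory_alt
  rw [foldA_eq_counter stock _ hpre]
  rw [show (fun (ci : PySem.Dict String Int) name => ci.modify name 0 (· + 1)) = (fun ci x => ci.modify x 0 (· + 1)) from rfl]
  rw [← PySem.Dict.counter_eq_foldl]
  simp [PySem.Dict.items_counter]
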